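-- pv_equiv track=rewrite | github.com/loicpottier/covid19 | versionmonde/outils.py | navbar_dropdown_1
-- ===== SOURCE A (Python) =====
-- def idify(s):
--     for c in [' ','\t','\n',"'",'"','-','(',')']:
--         s = s.replace(c,'_')
--     return(s)
--
-- def navbar_dropdown_1(id,nom,nomdrop,liste):
--     r = '''
-- <script src="https://code.jquery.com/jquery-3.5.0.js"></script>
-- <script type="text/javascript">
-- $(function(){
-- '''
--     for (nomitem,url) in liste:
--         r += '''
--     $("#''' + idify(id + '0' + nomitem) + '''").click(function(e){
--         e.preventDefault(); //To prevent the default anchor tag behaviour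
--         var url = this.href;
--         $.get(url, function(data){
-- 	    $("#lechartamontrer''' + idify(id) + '''").html(data);
-- 	    });
--     });'''
--     r += '''
-- });'''
--     r += '''
-- </script>
-- <nav class="navbar navbar-expand-lg navbar-light bg-light">
--   <a class="navbar-brand" href="#">''' + nom + '''</a>
--   <button class="navbar-toggler" type="button" data-toggle="collapse" data-target="#''' + idify(id) + '''" aria-controls="''' + idify(id) + '''" aria-expanded="false" aria-label="Toggle navigation">
--     <span class="navbar-toggler-icon"></span>
--   </button>
--   <div class="collapse navbar-collapse" id="''' + idify(id) + '''">
--     <ul class="navbar-nav">'''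
--     r += '''
--     <li class="nav-item dropdown">
--       <a class="nav-link dropdown-toggle" href="#" id="''' + idify(id + '0') + '''" data-toggle="dropdown" aria-haspopup="true" aria-expanded="false">
--         ''' + nomdrop + '''
--       </a>
--       <div id="''' + idify(id + '0') + '''" class="dropdown-menu" aria-labelledby="''' + idify(id + '0') + '''">'''
--     for (j,(nomitem,url)) in enumerate(liste):
--         r += '''<a id="''' + idify(id + '0' + nomitem) + '''" class="dropdown-item" href="''' + url + '''">''' + nomitem + '''</a>'''
--     r += '''
--         </div>
--       </li>'''
--     r += '''
--     </ul>
--   </div>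
-- </nav>
-- <div id="lechartamontrer''' + idify(id) + '''"></div>
-- '''
--     return(r)
-- ===== SOURCE B (Python) =====
-- # B: single pass over liste pushing the pieces of the jQuery handlers and of the
-- # dropdown items onto two accumulator lists, final string assembled by ONE join;
-- # idify is a per-character translation table instead of eight str.replace passes.
-- _TABLE = {ord(c): '_' for c in ' \t\n\'"-()'}
--
-- def _idify(s):
--     return s.translate(_TABLE)
--
-- _H1 = '\n    $("#'
-- _H2 = ('").click(function(e){\n'
--        '        e.preventDefault(); //To prevent the default anchor tag behaviour\n'
--        '        var url = this.href;\n'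
--        '        $.get(url, function(data){ \n'
--        '\t    $("#lechartamontrer')
-- _H3 = '").html(data);\n\t    });\n    });'
-- _I1 = '<a id="'
-- _I2 = '" class="dropdown-item" href="'
-- _I3 = '">'
-- _I4 = '</a>'
--
-- def navbar_dropdown_1(id, nom, nomdrop, liste):
--     iid = _idify(id)
--     did = _idify(id + '0')
--     handlers = []
--     items = []
--     for nomitem, url in liste:
--         item_id = _idify(id + '0' + nomitem)
--         handlers.extend((_H1, item_id, _H2, iid, _H3))
--         items.extend((_I1, item_id, _I2, url, _I3, nomitem, _I4))
--     parts = ['\n<script src="https://code.jquery.com/jquery-3.5.0.js"></script>\n'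
--              '<script type="text/javascript">\n'
--              '$(function(){\n']
--     parts += handlers
--     parts += ['\n});',
--               '\n</script>\n'
--               '<nav class="navbar navbar-expand-lg navbar-light bg-light">\n'
--               '  <a class="navbar-brand" href="#">', nom,
--               '</a>\n'
--               '  <button class="navbar-toggler" type="button" data-toggle="collapse" data-target="#',
--               iid, '" aria-controls="', iid,
--               '" aria-expanded="false" aria-label="Toggle navigation">\n'
--               '    <span class="navbar-toggler-icon"></span>\n'
--               '  </button>\n'
--               '  <div class="collapse navbar-collapse" id="', iid,
--               '">\n    <ul class="navbar-nav">',
--               '\n    <li class="nav-item dropdown">\n'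
--               '      <a class="nav-link dropdown-toggle" href="#" id="', did,
--               '" data-toggle="dropdown" aria-haspopup="true" aria-expanded="false">\n'
--               '        ', nomdrop,
--               '\n      </a>\n'
--               '      <div id="', did, '" class="dropdown-menu" aria-labelledby="', did, '">']
--     parts += items
--     parts += ['\n        </div>\n      </li>',
--               '\n    </ul>\n  </div>\n</nav>\n<div id="lechartamontrer', iid, '"></div>\n']
--     return ''.join(parts)
-- ===== Notes on version B (the rewrite author's own statement) =====
-- stated objective: alternative
-- what changed: B makes one pass over liste maintaining two accumulator lists (jQuery handler fragments and dropdown-item fragments) that are joined once into the final string, instead of A's two separate += scans over the list; idify becomes a single per-character translation pass instead of eight successive str.replace passes.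
import Mathlib
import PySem

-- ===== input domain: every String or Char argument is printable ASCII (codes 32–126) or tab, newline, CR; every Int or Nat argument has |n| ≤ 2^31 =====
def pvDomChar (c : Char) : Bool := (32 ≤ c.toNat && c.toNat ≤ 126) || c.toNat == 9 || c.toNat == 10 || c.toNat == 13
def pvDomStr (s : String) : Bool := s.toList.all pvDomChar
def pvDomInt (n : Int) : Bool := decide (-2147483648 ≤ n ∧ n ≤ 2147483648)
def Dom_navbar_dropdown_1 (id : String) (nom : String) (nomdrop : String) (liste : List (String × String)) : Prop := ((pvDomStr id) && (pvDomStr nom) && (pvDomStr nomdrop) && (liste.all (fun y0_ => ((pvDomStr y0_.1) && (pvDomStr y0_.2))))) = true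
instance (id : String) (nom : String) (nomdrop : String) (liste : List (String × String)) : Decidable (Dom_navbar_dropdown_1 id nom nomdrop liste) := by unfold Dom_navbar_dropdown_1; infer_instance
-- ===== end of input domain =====

-- B re-decomposes A: one pass over `liste` maintaining two accumulators (handler and
-- dropdown-item fragments) joined once at the end, instead of A's two separate += scans,
-- and idify as a single per-character translation (a table) instead of eight str.replace passes.

-- ===== PORT A =====
-- idify: eight successive str.replace passes, as in the Python
def pvIdify (s : String) : String :=
  [' ', '\t', '\n', '\'', '\"', '-', '(', ')'].foldl
    (fun t c => PySem.Str.replace t (String.ofList [c]) "_") s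

def navbar_dropdown_1 (id : String) (nom : String) (nomdrop : String) (liste : List (String × String)) : String :=
  let r := "\n<script src=\"https://code.jquery.com/jquery-3.5.0.js\"></script>\n<script type=\"text/javascript\">\n$(function(){\n"
  let r := liste.foldl (fun r p =>
    r ++ ("\n    $(\"#" ++ pvIdify (id ++ "0" ++ p.1) ++ "\").click(function(e){\n        e.preventDefault(); //To prevent the default anchor tag behaviour\n        var url = this.href;\n        $.get(url, function(data){ \n\t    $(\"#lechartamontrer" ++ pvIdify id ++ "\").html(data);\n\t    });\n    });")) r
  let r := r ++ "\n});"
  let r := r ++ ("\n</script>\n<nav class=\"navbar navbar-expand-lg navbar-light bg-light\">\n  <a class=\"navbar-brand\" href=\"#\">" ++ nom ++ "</a>\n  <button class=\"navbar-toggler\" type=\"button\" data-toggle=\"collapse\" data-target=\"#" ++ pvIdify id ++ "\" aria-controls=\"" ++ pvIdify id ++ "\" aria-expanded=\"false\" aria-label=\"Toggle navigation\">\n    <span class=\"navbar-toggler-icon\"></span>\n  </button>\n  <div class=\"collapse navbar-collapse\" id=\"" ++ pvIdify id ++ "\">\n    <ul class=\"navbar-nav\">")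
  let r := r ++ ("\n    <li class=\"nav-item dropdown\">\n      <a class=\"nav-link dropdown-toggle\" href=\"#\" id=\"" ++ pvIdify (id ++ "0") ++ "\" data-toggle=\"dropdown\" aria-haspopup=\"true\" aria-expanded=\"false\">\n        " ++ nomdrop ++ "\n      </a>\n      <div id=\"" ++ pvIdify (id ++ "0") ++ "\" class=\"dropdown-menu\" aria-labelledby=\"" ++ pvIdify (id ++ "0") ++ "\">")
  let r := (PySem.List.enumerate liste 0).foldl (fun r jp =>
    r ++ ("<a id=\"" ++ pvIdify (id ++ "0" ++ jp.2.1) ++ "\" class=\"dropdown-item\" href=\"" ++ jp.2.2 ++ "\">" ++ jp.2.1 ++ "</a>")) r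
  let r := r ++ "\n        </div>\n      </li>"
  let r := r ++ ("\n    </ul>\n  </div>\n</nav>\n<div id=\"lechartamontrer" ++ pvIdify id ++ "\"></div>\n")
  r

-- ===== PORT B =====
-- Source B's translation table {ord(c): '_' for c in ' \t\n\'"-()'}
def pvTable : PySem.Dict Int String :=
  ([' ', '\t', '\n', '\'', '\"', '-', '(', ')'] : List Char).foldl
    (fun d c => PySem.Dict.insert d (c.toNat : Int) "_") PySem.Dict.empty

-- idify as one per-character translation pass: s.translate(_TABLE)
-- (str.translate is not in PySem; ported by hand, exact: each char is mapped to
--  its table entry when its code is a key, and kept otherwise)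
def pvIdifyAlt (s : String) : String :=
  PySem.Str.join "" (s.toList.map (fun c => ((PySem.Dict.get? pvTable (c.toNat : Int)).getD (String.ofList [c]))))

def navbar_dropdown_1_alt (id : String) (nom : String) (nomdrop : String) (liste : List (String × String)) : String :=
  let iid := pvIdifyAlt id
  let did := pvIdifyAlt (id ++ "0")
  let hi := liste.foldl (fun (hi : List String × List String) p =>
    let itemId := pvIdifyAlt (id ++ "0" ++ p.1)
    (hi.1 ++ ["\n    $(\"#", itemId, "\").click(function(e){\n        e.preventDefault(); //To prevent the default anchor tag behaviour\n        var url = this.href;\n        $.get(url, function(data){ \n\t    $(\"#lechartamontrer", iid, "\").html(data);\n\t    });\n    });"],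
     hi.2 ++ ["<a id=\"", itemId, "\" class=\"dropdown-item\" href=\"", p.2, "\">", p.1, "</a>"])) ([], [])
  let parts := ["\n<script src=\"https://code.jquery.com/jquery-3.5.0.js\"></script>\n<script type=\"text/javascript\">\n$(function(){\n"]
  let parts := parts ++ hi.1
  let parts := parts ++ ["\n});",
    "\n</script>\n<nav class=\"navbar navbar-expand-lg navbar-light bg-light\">\n  <a class=\"navbar-brand\" href=\"#\">", nom, "</a>\n  <button class=\"navbar-toggler\" type=\"button\" data-toggle=\"collapse\" data-target=\"#", iid, "\" aria-controls=\"", iid, "\" aria-expanded=\"false\" aria-label=\"Toggle navigation\">\n    <span class=\"navbar-toggler-icon\"></span>\n  </button>\n  <div class=\"collapse navbar-collapse\" id=\"", iid, "\">\n    <ul class=\"navbar-nav\">",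
    "\n    <li class=\"nav-item dropdown\">\n      <a class=\"nav-link dropdown-toggle\" href=\"#\" id=\"", did, "\" data-toggle=\"dropdown\" aria-haspopup=\"true\" aria-expanded=\"false\">\n        ", nomdrop, "\n      </a>\n      <div id=\"", did, "\" class=\"dropdown-menu\" aria-labelledby=\"", did, "\">"]
  let parts := parts ++ hi.2
  let parts := parts ++ ["\n        </div>\n      </li>", "\n    </ul>\n  </div>\n</nav>\n<div id=\"lechartamontrer", iid, "\"></div>\n"]
  PySem.Str.join "" parts

-- ===== PRECONDITION & SPEC =====
def Spec_navbar_dropdown_1 (id : String) (nom : String) (nomdrop : String) (liste : List (String × String)) (out : String) : Prop := out = navbar_dropdown_1_alt id nom nomdrop liste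
instance (id : String) (nom : String) (nomdrop : String) (liste : List (String × String)) (out : String) : Decidable (Spec_navbar_dropdown_1 id nom nomdrop liste out) := by unfold Spec_navbar_dropdown_1; infer_instance

-- ===== CLAIM (what is proved, stated in full; the proofs are below) =====
def Claim_equal_navbar_dropdown_1 : Prop := ∀ (id : String) (nom : String) (nomdrop : String) (liste : List (String × String)), Dom_navbar_dropdown_1 id nom nomdrop liste → Spec_navbar_dropdown_1 id nom nomdrop liste (navbar_dropdown_1 id nom nomdrop liste)

-- ===== LEMMAS AND PROOFS =====
theorem pv_go_single (c : Char) : ∀ (l acc : List Char) (fuel : Nat), l.length ≤ fuel →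
    PySem.Chars.replace.go [c] ['_'] fuel l acc
      = acc.reverse ++ l.map (fun x => if x = c then '_' else x) := by
  intro l
  induction l with
  | nil => intro acc fuel _; cases fuel <;> simp [PySem.Chars.replace.go]
  | cons x t ih =>
    intro acc fuel hf
    cases fuel with
    | zero => simp at hf
    | succ n =>
      rw [PySem.Chars.replace.go]
      simp only [List.length_cons, Nat.add_le_add_iff_right] at hf
      by_cases hx : x = c
      · subst hx
        rw [if_pos (by simp [List.isPrefixOf])]
        rw [show List.drop [x].length (x :: t) = t from by simp,
            show (['_'].reverse ++ acc) = '_' :: acc from rfl, ih _ n hf]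
        simp
      · rw [if_neg (by simp [List.isPrefixOf]; exact fun h => hx h.symm)]
        rw [ih _ n hf]
        simp [hx]

theorem pv_replace_single (s : String) (c : Char) :
    PySem.Str.replace s (String.ofList [c]) "_"
      = String.ofList (s.toList.map (fun x => if x = c then '_' else x)) := by
  rw [PySem.Str.replace]
  rw [show (String.ofList [c]).toList = [c] from by simp,
      show ("_" : String).toList = ['_'] from rfl]
  rw [PySem.Chars.replace]
  rw [if_neg (by simp)]
  rw [pv_go_single c _ _ _ (by simp)]
  simp




theorem pv_intercalate_nil (l : List (List Char)) : ([] : List Char).intercalate l = l.flatten := by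
  induction l with
  | nil => simp [List.intercalate]
  | cons x t ih =>
    cases t with
    | nil => simp [List.intercalate]
    | cons y u => simp [List.intercalate, List.intersperse] at ih ⊢; simpa using ih

theorem pv_join_empty_toList (parts : List String) :
    (PySem.Str.join "" parts).toList = (parts.map String.toList).flatten := by
  simp [PySem.Str.join, PySem.Chars.join, pv_intercalate_nil]

theorem pv_key_ne (c d : Char) (k : Int) (hd : (d.toNat : Int) = k) (h : ¬ c = d) :
    (k == (c.toNat : Int)) = false := by
  subst hd
  simp only [beq_eq_false_iff_ne, ne_eq]
  intro hh
  have hn : c.toNat = d.toNat := by exact_mod_cast hh.symm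
  exact h (Char.ext (UInt32.toNat_inj.mp hn))

theorem pv_get_table (c : Char) :
    PySem.Dict.get? pvTable (c.toNat : Int)
      = if c ∈ ([' ', '\t', '\n', '\'', '\"', '-', '(', ')'] : List Char) then some "_" else none := by
  by_cases h : c ∈ ([' ', '\t', '\n', '\'', '\"', '-', '(', ')'] : List Char)
  · rw [if_pos h]
    simp only [List.mem_cons, List.not_mem_nil, or_false] at h
    rcases h with rfl|rfl|rfl|rfl|rfl|rfl|rfl|rfl <;> decide
  · rw [if_neg h]
    simp only [List.mem_cons, List.not_mem_nil, or_false, not_or] at h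
    obtain ⟨h1,h2,h3,h4,h5,h6,h7,h8⟩ := h
    rw [show pvTable = PySem.Dict.mk [((32:Int),"_"),(9,"_"),(10,"_"),(39,"_"),(34,"_"),(45,"_"),(40,"_"),(41,"_")] from by decide]
    simp only [PySem.Dict.get?_mk_cons]
    rw [pv_key_ne c ' ' 32 (by decide) h1, pv_key_ne c '\t' 9 (by decide) h2,
        pv_key_ne c '\n' 10 (by decide) h3, pv_key_ne c '\'' 39 (by decide) h4,
        pv_key_ne c '\"' 34 (by decide) h5, pv_key_ne c '-' 45 (by decide) h6,
        pv_key_ne c '(' 40 (by decide) h7, pv_key_ne c ')' 41 (by decide) h8]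
    simp [PySem.Dict.get?]

theorem pv_char_eq (c : Char) :
    (if c ∈ ([' ', '\t', '\n', '\'', '\"', '-', '(', ')'] : List Char) then ('_' : Char) else c)
      = ((fun x => if x = ')' then '_' else x) ∘ (fun x => if x = '(' then '_' else x) ∘
         (fun x => if x = '-' then '_' else x) ∘ (fun x => if x = '\"' then '_' else x) ∘
         (fun x => if x = '\'' then '_' else x) ∘ (fun x => if x = '\n' then '_' else x) ∘
         (fun x => if x = '\t' then '_' else x) ∘ (fun x => if x = ' ' then '_' else x)) c := by
  by_cases h : c ∈ ([' ', '\t', '\n', '\'', '\"', '-', '(', ')'] : List Char)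
  · simp only [List.mem_cons, List.not_mem_nil, or_false] at h
    rcases h with rfl|rfl|rfl|rfl|rfl|rfl|rfl|rfl <;> decide
  · simp only [List.mem_cons, List.not_mem_nil, or_false, not_or] at h
    obtain ⟨h1,h2,h3,h4,h5,h6,h7,h8⟩ := h
    simp [List.mem_cons, Function.comp, h1,h2,h3,h4,h5,h6,h7,h8]

theorem pv_flatten_singleton {a : Type} (l : List a) : (l.map (fun c => [c])).flatten = l := by
  induction l with
  | nil => rfl
  | cons x t ih => simp [ih]

theorem pv_idify_alt_eq (s : String) : pvIdifyAlt s = pvIdify s := by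
  rw [← String.toList_inj]
  rw [show pvIdify s = String.ofList ((((((((s.toList.map
      (fun x => if x = ' ' then '_' else x)).map (fun x => if x = '\t' then '_' else x)).map
      (fun x => if x = '\n' then '_' else x)).map (fun x => if x = '\'' then '_' else x)).map
      (fun x => if x = '\"' then '_' else x)).map (fun x => if x = '-' then '_' else x)).map
      (fun x => if x = '(' then '_' else x)).map (fun x => if x = ')' then '_' else x)) from by
    simp only [pvIdify, List.foldl_cons, List.foldl_nil, pv_replace_single, String.toList_ofList]]
  rw [pvIdifyAlt, pv_join_empty_toList]
  simp only [List.map_map, String.toList_ofList]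
  rw [show (String.toList ∘ fun c => (PySem.Dict.get? pvTable (c.toNat : Int)).getD (String.ofList [c]))
      = fun c => [if c ∈ ([' ', '\t', '\n', '\'', '\"', '-', '(', ')'] : List Char) then '_' else c] from by
    funext c
    simp only [Function.comp_apply, pv_get_table]
    split <;> simp]
  rw [show (fun c => [if c ∈ ([' ', '\t', '\n', '\'', '\"', '-', '(', ')'] : List Char) then ('_':Char) else c]) = (fun c => [c]) ∘ (fun c => if c ∈ ([' ', '\t', '\n', '\'', '\"', '-', '(', ')'] : List Char) then ('_':Char) else c) from rfl]
  rw [← List.map_map, pv_flatten_singleton]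
  exact List.map_congr_left (fun a _ => pv_char_eq a)


theorem pv_join_empty_nil : PySem.Str.join "" ([] : List String) = "" := by
  rw [← String.toList_inj]; simp [PySem.Str.join, PySem.Chars.join, List.intercalate]

theorem pv_join_empty_cons (x : String) (xs : List String) :
    PySem.Str.join "" (x :: xs) = x ++ PySem.Str.join "" xs := by
  rw [← String.toList_inj]
  simp [String.toList_append, PySem.Str.join, PySem.Chars.join, pv_intercalate_nil]

def pvSconcat (l : List String) : String := l.foldr (· ++ ·) ""

theorem pv_sconcat_nil : pvSconcat [] = "" := rfl

theorem pv_sconcat_cons (x : String) (l : List String) : pvSconcat (x :: l) = x ++ pvSconcat l := rfl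

theorem pv_join_empty_eq_sconcat (l : List String) : PySem.Str.join "" l = pvSconcat l := by
  induction l with
  | nil => exact pv_join_empty_nil
  | cons x xs ih => rw [pv_join_empty_cons, ih]; rfl

theorem pv_foldl_append {α : Type} (f : α → String) :
    ∀ (l : List α) (init : String),
      l.foldl (fun r x => r ++ f x) init = init ++ pvSconcat (l.map f) := by
  intro l
  induction l with
  | nil => intro init; simp [pvSconcat]
  | cons x t ih => intro init; simp only [List.foldl_cons, List.map_cons]; rw [ih]; simp [pvSconcat, String.append_assoc]

theorem pv_foldl_pair {α : Type} (hf gf : α → List String) :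
    ∀ (l : List α) (a b : List String),
      l.foldl (fun hi p => (hi.1 ++ hf p, hi.2 ++ gf p)) (a, b)
        = (a ++ l.flatMap hf, b ++ l.flatMap gf) := by
  intro l
  induction l with
  | nil => intro a b; simp
  | cons x t ih => intro a b; simp only [List.foldl_cons]; rw [ih]; simp

theorem pv_sconcat_append (l1 l2 : List String) :
    pvSconcat (l1 ++ l2) = pvSconcat l1 ++ pvSconcat l2 := by
  induction l1 with
  | nil => simp [pvSconcat]
  | cons x t ih => simp only [List.cons_append, pvSconcat, List.foldr_cons] at ih ⊢; rw [ih, String.append_assoc]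

theorem pv_sconcat_flatMap {α : Type} (f : α → List String) (l : List α) :
    pvSconcat (l.flatMap f) = pvSconcat (l.map (fun x => pvSconcat (f x))) := by
  induction l with
  | nil => rfl
  | cons x t ih =>
    simp only [List.flatMap_cons, List.map_cons, pv_sconcat_append]
    rw [ih]
    simp [pvSconcat]

theorem pv_foldl_enum {α β : Type} (f : β → α → β) :
    ∀ (l : List α) (n : Int) (b : β),
      (PySem.List.enumerate l n).foldl (fun r jp => f r jp.2) b = l.foldl f b := by
  intro l
  induction l with
  | nil => intro n b; simp [PySem.List.enumerate]
  | cons x t ih => intro n b; simp only [PySem.List.enumerate, List.foldl_cons]; exact ih _ _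

-- ===== VERDICT (by name: the statement is the Claim_ definition above) =====
theorem navbar_dropdown_1_spec : Claim_equal_navbar_dropdown_1 := by
  intro id nom nomdrop liste _
  unfold Spec_navbar_dropdown_1
  dsimp only [navbar_dropdown_1, navbar_dropdown_1_alt]
  rw [pv_foldl_pair (α := String × String)
      (hf := fun p => ["\n    $(\"#", pvIdifyAlt (id ++ "0" ++ p.1), "\").click(function(e){\n        e.preventDefault(); //To prevent the default anchor tag behaviour\n        var url = this.href;\n        $.get(url, function(data){ \n\t    $(\"#lechartamontrer", pvIdifyAlt id, "\").html(data);\n\t    });\n    });"])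
      (gf := fun p => ["<a id=\"", pvIdifyAlt (id ++ "0" ++ p.1), "\" class=\"dropdown-item\" href=\"", p.2, "\">", p.1, "</a>"])]
  rw [pv_foldl_enum (α := String × String) (β := String) (f := fun r p => r ++ ("<a id=\"" ++ pvIdify (id ++ "0" ++ p.1) ++ "\" class=\"dropdown-item\" href=\"" ++ p.2 ++ "\">" ++ p.1 ++ "</a>"))]
  rw [pv_foldl_append (α := String × String) (f := fun p => "\n    $(\"#" ++ pvIdify (id ++ "0" ++ p.1) ++ "\").click(function(e){\n        e.preventDefault(); //To prevent the default anchor tag behaviour\n        var url = this.href;\n        $.get(url, function(data){ \n\t    $(\"#lechartamontrer" ++ pvIdify id ++ "\").html(data);\n\t    });\n    });"),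
      pv_foldl_append (α := String × String) (f := fun p => "<a id=\"" ++ pvIdify (id ++ "0" ++ p.1) ++ "\" class=\"dropdown-item\" href=\"" ++ p.2 ++ "\">" ++ p.1 ++ "</a>")]
  simp only [pv_join_empty_eq_sconcat, List.nil_append, pv_sconcat_append, pv_sconcat_flatMap,
    pv_idify_alt_eq, pv_sconcat_cons, pv_sconcat_nil,
    String.append_assoc, String.append_empty]
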